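-- pv_equiv track=rewrite | github.com/GabrielAF-Faca/grupo_estudos_SBC_2025 | collatz_polinomial.py | multiplica_polinomio
-- ===== SOURCE A (Python) =====
-- def multiplica_polinomio(p:list):
--     '''
--     Função que multiplica uma lista de coeficientes de um polinomio pelo polinomio (x + 1) ([1, 1])
--     :param p: Polinomio a ser multiplicado
--     :return: Polinomio multiplicado
--     '''
--
--     p2 = [1, 1]
--     res = [0] * (len(p) + len(p2) - 1)
--     for o1, i1 in enumerate(p):
--         for o2, i2 in enumerate(p2):
--             res[o1 + o2] += i1 * i2
--     res[0] += 1
--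
--     return res
-- ===== SOURCE B (Python) =====
-- def multiplica_polinomio(p: list):
--     """Shift-and-add: (x+1)*P gathers each coefficient from the two aligned
--     copies of p, then applies the final res[0] += 1 the original performs."""
--     res = [a + b for a, b in zip(p + [0], [0] + p)]
--     res[0] += 1
--     return res
-- ===== Notes on version B (the rewrite author's own statement) =====
-- stated objective: idiomatic
-- what changed: Replaces the nested scatter convolution into a preallocated mutable buffer by a single gather comprehension zipping the two shifted copies of p (p padded with a trailing zero, and p prefixed with a zero), keeping the final increment of the constant coefficient.
import Mathlib
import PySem

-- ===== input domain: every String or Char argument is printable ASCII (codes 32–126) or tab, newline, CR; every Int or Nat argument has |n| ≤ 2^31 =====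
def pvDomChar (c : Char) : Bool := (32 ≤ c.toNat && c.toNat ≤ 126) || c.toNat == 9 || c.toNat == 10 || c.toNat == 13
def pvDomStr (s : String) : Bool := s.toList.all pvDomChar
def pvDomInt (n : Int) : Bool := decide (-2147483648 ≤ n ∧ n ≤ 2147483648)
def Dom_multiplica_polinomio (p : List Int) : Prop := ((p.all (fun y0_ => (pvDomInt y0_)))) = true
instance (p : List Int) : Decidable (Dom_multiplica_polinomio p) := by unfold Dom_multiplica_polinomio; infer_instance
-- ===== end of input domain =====

-- B replaces A's nested scatter convolution by a one-pass gather over the two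
-- shifted copies of p (idiomatic); same result, including the final res[0] += 1.

-- `res[i] += v` on an in-range nonnegative index (always the case in both programs)
def pvUpd (res : List Int) (i : Int) (v : Int) : List Int :=
  res.set i.toNat ((res.getD i.toNat 0) + v)

-- ===== PORT A =====
def multiplica_polinomio (p : List Int) : List Int :=
  let p2 : List Int := [1, 1]
  let res0 : List Int := List.replicate (p.length + p2.length - 1) 0
  let res := (PySem.List.enumerate p).foldl
    (fun res oi =>
      (PySem.List.enumerate p2).foldl
        (fun res oj => pvUpd res (oi.1 + oj.1) (oi.2 * oj.2)) res) res0
  pvUpd res 0 1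

-- ===== PORT B =====
def multiplica_polinomio_alt (p : List Int) : List Int :=
  let res := List.zipWith (· + ·) (p ++ [0]) (0 :: p)
  pvUpd res 0 1

-- ===== PRECONDITION & SPEC =====
def Spec_multiplica_polinomio (p : List Int) (out : List Int) : Prop := out = multiplica_polinomio_alt p
instance (p : List Int) (out : List Int) : Decidable (Spec_multiplica_polinomio p out) := by unfold Spec_multiplica_polinomio; infer_instance

-- ===== CLAIM (what is proved, stated in full; the proofs are below) =====
def Claim_equal_multiplica_polinomio : Prop := ∀ (p : List Int), Dom_multiplica_polinomio p → Spec_multiplica_polinomio p (multiplica_polinomio p)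

-- ===== LEMMAS AND PROOFS =====

-- A's step for one element i at index o: add i at positions o and o+1
def pvStep (res : List Int) (oi : Int × Int) : List Int :=
  pvUpd (pvUpd res oi.1 oi.2) (oi.1 + 1) oi.2

theorem pvInner (res : List Int) (o i : Int) :
    (PySem.List.enumerate [(1:Int), 1]).foldl
      (fun r oj => pvUpd r (o + oj.1) (i * oj.2)) res = pvStep res (o, i) := by
  simp [PySem.List.enumerate, pvStep]

theorem pvUpd_cons_succ (h : Int) (t : List Int) (k : ℕ) (v : Int) :
    pvUpd (h :: t) ((k : Int) + 1) v = h :: pvUpd t (k : Int) v := by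
  have hk : (((k : Int) + 1)).toNat = k + 1 := by omega
  have hk' : ((k : Int)).toNat = k := by omega
  simp [pvUpd, hk, hk', List.getD]

theorem pvShift (q : List Int) (k : ℕ) :
    ∀ (h : Int) (t : List Int),
    (PySem.List.enumerate q ((k : Int) + 1)).foldl pvStep (h :: t) =
      h :: (PySem.List.enumerate q (k : Int)).foldl pvStep t := by
  induction q generalizing k with
  | nil => intro h t; simp [PySem.List.enumerate]
  | cons a q' ih =>
    intro h t
    rw [PySem.List.enumerate_cons, PySem.List.enumerate_cons]
    have e2 : ((k : Int) + 1) + 1 = ((k + 1 : ℕ) : Int) + 1 := by push_cast; ring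
    have e1 : (k : Int) + 1 = ((k + 1 : ℕ) : Int) := by push_cast; ring
    simp only [List.foldl_cons]
    have hs : pvStep (h :: t) ((k : Int) + 1, a) = h :: pvStep t ((k : Int), a) := by
      simp only [pvStep]
      rw [pvUpd_cons_succ]
      have : (k : Int) + 1 + 1 = ((k + 1 : ℕ) : Int) + 1 := e2
      rw [this, pvUpd_cons_succ, e1]
    rw [hs, e2, e1, ih]

theorem pvMain (p : List Int) :
    ∀ (prev : Int),
    (PySem.List.enumerate p 0).foldl pvStep (prev :: List.replicate p.length 0) =
      List.zipWith (· + ·) (p ++ [0]) (prev :: p) := by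
  induction p with
  | nil => intro prev; simp [PySem.List.enumerate]
  | cons a p' ih =>
    intro prev
    rw [PySem.List.enumerate_cons, List.foldl_cons]
    have hs : pvStep (prev :: List.replicate (a :: p').length 0) ((0 : Int), a) =
        (prev + a) :: ((0 + a) :: List.replicate p'.length 0) := by
      simp [pvStep, pvUpd, List.replicate_succ, List.getD]
    rw [hs]
    have h1 : (0 : Int) + 1 = ((0 : ℕ) : Int) + 1 := by norm_num
    rw [h1, pvShift]
    have h0 : ((0 : ℕ) : Int) = (0 : Int) := by norm_num
    rw [h0]
    have : (0 : Int) + a = a := by ring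
    rw [this, ih a]
    simp
    ring

theorem pvFoldEq (p : List Int) :
    (PySem.List.enumerate p 0).foldl
      (fun res oi =>
        (PySem.List.enumerate [(1:Int),1]).foldl
          (fun r oj => pvUpd r (oi.1 + oj.1) (oi.2 * oj.2)) res)
      (List.replicate (p.length + 2 - 1) 0) =
      List.zipWith (· + ·) (p ++ [0]) (0 :: p) := by
  have hf : (fun (res : List Int) (oi : Int × Int) =>
      (PySem.List.enumerate [(1:Int),1]).foldl
        (fun r oj => pvUpd r (oi.1 + oj.1) (oi.2 * oj.2)) res) = pvStep := by
    funext res oi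
    have := pvInner res oi.1 oi.2
    simpa using this
  rw [hf]
  have hr : List.replicate (p.length + 2 - 1) 0 = (0 : Int) :: List.replicate p.length 0 := by
    have : p.length + 2 - 1 = p.length + 1 := by omega
    rw [this, List.replicate_succ]
  rw [hr, pvMain p 0]

-- ===== VERDICT (by name: the statement is the Claim_ definition above) =====
theorem multiplica_polinomio_spec : Claim_equal_multiplica_polinomio := by
  intro p _
  show multiplica_polinomio p = multiplica_polinomio_alt p
  unfold multiplica_polinomio multiplica_polinomio_alt
  simp only []
  rw [show ([(1:Int),1] : List Int).length = 2 from rfl]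
  rw [pvFoldEq]
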